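-- pv_equiv track=rewrite | github.com/1000ssam/skills-for-teachers | skills/exam-analyzer/scripts/crop_questions.py | _find_cluster_center
-- ===== SOURCE A (Python) =====
-- COL_TOLERANCE = 20  # 컬럼 기준점으로부터 허용 오차 (pt)
--
-- def _find_cluster_center(xs):
--     """x좌표 리스트에서 가장 많이 모인 클러스터의 중심을 반환."""
--     if not xs:
--         return None
--     # 가장 작은 값 근처에 클러스터가 있을 가능성이 높음 (컬럼 시작점)
--     xs_sorted = sorted(xs)
--     best_center = xs_sorted[0]
--     best_count = 0
--     for x in xs_sorted:
--         count = sum(1 for v in xs if abs(v - x) < COL_TOLERANCE)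
--         if count > best_count:
--             best_count = count
--             best_center = x
--     return best_center
-- ===== SOURCE B (Python) =====
-- COL_TOLERANCE = 20
--
--
-- def _find_cluster_center(xs):
--     """Sort once, then slide a two-pointer window instead of re-scanning xs for every x."""
--     if not xs:
--         return None
--     s = sorted(xs)
--     n = len(s)
--     best_center = s[0]
--     best_count = 0
--     lo = 0
--     hi = 0
--     for i in range(n):
--         x = s[i]
--         while hi < n and s[hi] < x + COL_TOLERANCE:
--             hi += 1
--         while s[lo] <= x - COL_TOLERANCE:
--             lo += 1
--         count = hi - lo
--         if count > best_count:
--             best_count = count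
--             best_center = x
--     return best_center
-- ===== Notes on version B (the rewrite author's own statement) =====
-- stated objective: faster
-- what changed: Replaces the per-element rescan of the whole list (count within tolerance recomputed from scratch for each x) by a sort-then-two-pointer sliding window whose endpoints advance monotonically over the sorted list.
import Mathlib
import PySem

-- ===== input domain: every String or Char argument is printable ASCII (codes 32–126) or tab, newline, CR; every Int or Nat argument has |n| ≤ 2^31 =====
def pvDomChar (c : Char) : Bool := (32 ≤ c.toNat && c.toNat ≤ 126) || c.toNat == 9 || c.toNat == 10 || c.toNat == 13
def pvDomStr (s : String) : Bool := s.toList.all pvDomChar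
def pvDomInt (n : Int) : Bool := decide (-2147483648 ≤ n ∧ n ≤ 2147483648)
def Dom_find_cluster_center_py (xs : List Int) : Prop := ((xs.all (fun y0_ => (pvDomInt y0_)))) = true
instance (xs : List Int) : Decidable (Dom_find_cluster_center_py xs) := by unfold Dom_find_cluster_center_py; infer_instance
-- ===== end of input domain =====

-- B replaces A's per-element rescan of the whole list by a sort-then-two-pointer sliding window.

-- ===== PORT A =====
def find_cluster_center_py (xs : List Int) : Option Int :=
  if xs = [] then none
  else
    let s := PySem.List.sorted xs (fun x => x) false
    let best := s.foldl (fun (b : Int × Int) x =>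
      let count : Int := xs.foldl (fun acc v => if |v - x| < 20 then acc + 1 else acc) 0
      if count > b.2 then (x, count) else b) (s.headD 0, 0)
    some best.1

-- ===== PORT B =====
-- while hi < n and s[hi] < t: hi += 1
def pvAdvLt (s : List Int) (t : Int) (p : Nat) : Nat :=
  if h : p < s.length then
    if s[p] < t then pvAdvLt s t (p + 1) else p
  else p
termination_by s.length - p

-- while s[lo] <= t: lo += 1   (the bounds check is a totality guard only; the Python loop stops before lo = n)
def pvAdvLe (s : List Int) (t : Int) (p : Nat) : Nat :=
  if h : p < s.length then
    if s[p] ≤ t then pvAdvLe s t (p + 1) else p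
  else p
termination_by s.length - p

def find_cluster_center_py_alt (xs : List Int) : Option Int :=
  if xs = [] then none
  else
    let s := PySem.List.sorted xs (fun x => x) false
    let n := s.length
    let st := (List.range n).foldl (fun (st : Nat × Nat × Int × Int) i =>
      let x := s.getD i 0
      let hi := pvAdvLt s (x + 20) st.2.1
      let lo := pvAdvLe s (x - 20) st.1
      let count : Int := (hi : Int) - (lo : Int)
      if count > st.2.2.2 then (lo, hi, x, count) else (lo, hi, st.2.2.1, st.2.2.2))
      (0, 0, s.headD 0, 0)
    some st.2.2.1

-- ===== PRECONDITION & SPEC =====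
def Spec_find_cluster_center_py (xs : List Int) (out : Option Int) : Prop := out = find_cluster_center_py_alt xs
instance (xs : List Int) (out : Option Int) : Decidable (Spec_find_cluster_center_py xs out) := by unfold Spec_find_cluster_center_py; infer_instance

-- ===== CLAIM (what is proved, stated in full; the proofs are below) =====
def Claim_equal_find_cluster_center_py : Prop := ∀ (xs : List Int), Dom_find_cluster_center_py xs → Spec_find_cluster_center_py xs (find_cluster_center_py xs)

-- ===== LEMMAS AND PROOFS =====

-- number of elements ≤ t / < t
def pvCLE (s : List Int) (t : Int) : Nat := s.countP (fun v => decide (v ≤ t))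
def pvCLT (s : List Int) (t : Int) : Nat := s.countP (fun v => decide (v < t))

theorem pv_char_le (s : List Int) (hs : s.Pairwise (· ≤ ·)) (t : Int)
    (j : Nat) (hj : j < s.length) : s[j] ≤ t ↔ j < pvCLE s t := by
  induction s generalizing j with
  | nil => simp at hj
  | cons a rest ih =>
    rw [List.pairwise_cons] at hs
    by_cases ha : a ≤ t
    · have hc : pvCLE (a :: rest) t = pvCLE rest t + 1 := by
        simp [pvCLE, ha]
      cases j with
      | zero => simpa [hc] using ha
      | succ k =>
        simp only [List.getElem_cons_succ, hc]
        rw [ih hs.2 k (by simpa using hj)]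
        omega
    · have hc : pvCLE (a :: rest) t = 0 := by
        simp only [pvCLE, List.countP_cons, decide_eq_true_eq, if_neg ha, Nat.add_zero]
        rw [List.countP_eq_zero]
        intro v hv
        have := hs.1 v hv
        simp only [decide_eq_true_eq]
        omega
      cases j with
      | zero => simp [hc, ha]
      | succ k =>
        simp only [hc, List.getElem_cons_succ]
        constructor
        · intro h
          exfalso
          have hk : k < rest.length := by simpa using hj
          have hm : rest[k] ∈ rest := List.getElem_mem hk
          have := hs.1 _ hm
          omega
        · omega

theorem pv_char_lt (s : List Int) (hs : s.Pairwise (· ≤ ·)) (t : Int)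
    (j : Nat) (hj : j < s.length) : s[j] < t ↔ j < pvCLT s t := by
  induction s generalizing j with
  | nil => simp at hj
  | cons a rest ih =>
    rw [List.pairwise_cons] at hs
    by_cases ha : a < t
    · have hc : pvCLT (a :: rest) t = pvCLT rest t + 1 := by
        simp [pvCLT, ha]
      cases j with
      | zero => simpa [hc] using ha
      | succ k =>
        simp only [List.getElem_cons_succ, hc]
        rw [ih hs.2 k (by simpa using hj)]
        omega
    · have hc : pvCLT (a :: rest) t = 0 := by
        simp only [pvCLT, List.countP_cons, decide_eq_true_eq, if_neg ha, Nat.add_zero]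
        rw [List.countP_eq_zero]
        intro v hv
        have := hs.1 v hv
        simp only [decide_eq_true_eq]
        omega
      cases j with
      | zero => simp [hc, ha]
      | succ k =>
        simp only [hc, List.getElem_cons_succ]
        constructor
        · intro h
          exfalso
          have hk : k < rest.length := by simpa using hj
          have hm : rest[k] ∈ rest := List.getElem_mem hk
          have := hs.1 _ hm
          omega
        · omega

theorem pvCLE_le_length (s : List Int) (t : Int) : pvCLE s t ≤ s.length :=
  List.countP_le_length
theorem pvCLT_le_length (s : List Int) (t : Int) : pvCLT s t ≤ s.length :=
  List.countP_le_length

theorem pvAdvLe_eq (s : List Int) (hs : s.Pairwise (· ≤ ·)) (t : Int) (p : Nat)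
    (hp : p ≤ pvCLE s t) : pvAdvLe s t p = pvCLE s t := by
  unfold pvAdvLe
  by_cases h : p < s.length
  · rw [dif_pos h]
    by_cases hsp : s[p] ≤ t
    · rw [if_pos hsp]
      have hlt : p < pvCLE s t := (pv_char_le s hs t p h).mp hsp
      exact pvAdvLe_eq s hs t (p + 1) hlt
    · rw [if_neg hsp]
      have := (pv_char_le s hs t p h)
      omega
  · rw [dif_neg h]
    have := pvCLE_le_length s t
    omega
termination_by s.length - p

theorem pvAdvLt_eq (s : List Int) (hs : s.Pairwise (· ≤ ·)) (t : Int) (p : Nat)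
    (hp : p ≤ pvCLT s t) : pvAdvLt s t p = pvCLT s t := by
  unfold pvAdvLt
  by_cases h : p < s.length
  · rw [dif_pos h]
    by_cases hsp : s[p] < t
    · rw [if_pos hsp]
      have hlt : p < pvCLT s t := (pv_char_lt s hs t p h).mp hsp
      exact pvAdvLt_eq s hs t (p + 1) hlt
    · rw [if_neg hsp]
      have := (pv_char_lt s hs t p h)
      omega
  · rw [dif_neg h]
    have := pvCLT_le_length s t
    omega
termination_by s.length - p

theorem pvCLE_mono (s : List Int) {t t' : Int} (h : t ≤ t') : pvCLE s t ≤ pvCLE s t' := by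
  apply List.countP_mono_left
  intro v _ hv
  simp only [decide_eq_true_eq] at *
  omega

theorem pvCLT_mono (s : List Int) {t t' : Int} (h : t ≤ t') : pvCLT s t ≤ pvCLT s t' := by
  apply List.countP_mono_left
  intro v _ hv
  simp only [decide_eq_true_eq] at *
  omega

theorem pv_count_split (s : List Int) (x : Int) :
    s.countP (fun v => decide (|v - x| < 20)) + pvCLE s (x - 20) = pvCLT s (x + 20) := by
  induction s with
  | nil => simp [pvCLE, pvCLT]
  | cons a rest ih =>
    simp only [pvCLE, pvCLT, List.countP_cons, decide_eq_true_eq] at *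
    by_cases h1 : |a - x| < 20 <;> by_cases h2 : a < x + 20 <;> by_cases h3 : a ≤ x - 20 <;>
      simp only [h1, h2, h3, if_pos, if_neg, not_false_iff] <;>
      first
        | omega
        | (exfalso; rw [abs_lt] at h1; omega)

-- the two folds compute the same (best_center, best_count) pair
theorem pv_main (s : List Int) (hs : s.Pairwise (· ≤ ·))
    (cnt : Int → Int) (hcnt : ∀ x, cnt x = (pvCLT s (x + 20) : Int) - (pvCLE s (x - 20) : Int)) :
    ∀ (i : Nat) (lo hi : Nat) (b : Int × Int),
      (i < s.length → lo ≤ pvCLE s (s.getD i 0 - 20) ∧ hi ≤ pvCLT s (s.getD i 0 + 20)) →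
      ((List.range' i (s.length - i)).foldl (fun (st : Nat × Nat × Int × Int) j =>
          let x := s.getD j 0
          let hi' := pvAdvLt s (x + 20) st.2.1
          let lo' := pvAdvLe s (x - 20) st.1
          let c : Int := (hi' : Int) - (lo' : Int)
          if c > st.2.2.2 then (lo', hi', x, c) else (lo', hi', st.2.2.1, st.2.2.2))
        (lo, hi, b.1, b.2)).2.2
      = (s.drop i).foldl (fun (b : Int × Int) x => if cnt x > b.2 then (x, cnt x) else b) b := by
  intro i
  induction hn : s.length - i using Nat.strong_induction_on generalizing i with
  | _ k ihk =>
  intro lo hi b hinv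
  cases k with
  | zero =>
    have : s.length ≤ i := by omega
    simp [List.drop_eq_nil_of_le this, hn]
  | succ m =>
    have hi_lt : i < s.length := by omega
    obtain ⟨hlo, hhi⟩ := hinv hi_lt
    have hgetD : s.getD i 0 = s[i] := List.getD_eq_getElem s 0 hi_lt
    rw [List.range'_succ, List.foldl_cons,
        ← List.getElem_cons_drop hi_lt, List.foldl_cons]
    simp only [hgetD] at hlo hhi ⊢
    have hloE : pvAdvLe s (s[i] - 20) lo = pvCLE s (s[i] - 20) := pvAdvLe_eq s hs _ lo hlo
    have hhiE : pvAdvLt s (s[i] + 20) hi = pvCLT s (s[i] + 20) := pvAdvLt_eq s hs _ hi hhi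
    have hc : ((pvAdvLt s (s[i] + 20) hi : Int) - (pvAdvLe s (s[i] - 20) lo : Int)) = cnt s[i] := by
      rw [hloE, hhiE, hcnt]
    have hnext : ∀ lo' hi' : Nat, lo' = pvCLE s (s[i] - 20) → hi' = pvCLT s (s[i] + 20) →
        (i + 1 < s.length → lo' ≤ pvCLE s (s.getD (i + 1) 0 - 20) ∧ hi' ≤ pvCLT s (s.getD (i + 1) 0 + 20)) := by
      intro lo' hi' hl hh hlt
      have hg : s.getD (i + 1) 0 = s[i + 1] := List.getD_eq_getElem s 0 hlt
      have hmono : s[i] ≤ s[i + 1] := by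
        have := List.pairwise_iff_getElem.mp hs i (i + 1) hi_lt hlt (by omega)
        exact this
      rw [hg]
      subst hl hh
      exact ⟨pvCLE_mono s (by omega), pvCLT_mono s (by omega)⟩
    have hrec := fun lo' hi' b' hinv' => ihk m (by omega) (i + 1) (by omega) lo' hi' b' hinv'
    by_cases hb : ((pvAdvLt s (s[i] + 20) hi : Int) - (pvAdvLe s (s[i] - 20) lo : Int)) > b.2
    · simp only [if_pos hb, hc ▸ hb]
      rw [hc]
      exact hrec _ _ (s[i], cnt s[i]) (hnext _ _ hloE hhiE)
    · simp only [if_neg hb, if_neg (hc ▸ hb)]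
      exact hrec _ _ b (hnext _ _ hloE hhiE)

-- ===== VERDICT (by name: the statement is the Claim_ definition above) =====
theorem find_cluster_center_py_spec : Claim_equal_find_cluster_center_py := by
  intro xs _
  unfold Spec_find_cluster_center_py find_cluster_center_py find_cluster_center_py_alt
  by_cases hxs : xs = []
  · simp [hxs]
  · rw [if_neg hxs, if_neg hxs]
    set s := PySem.List.sorted xs (fun x => x) false with hsdef
    have hs : s.Pairwise (· ≤ ·) := by
      have := PySem.List.sorted_pairwise (xs := xs) (key := fun x : Int => x)
      simpa [hsdef] using this
    have hperm : s.Perm xs := PySem.List.sorted_perm xs (fun x => x) false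
    -- A's inner count equals the window count on s
    have hcnt : ∀ x : Int,
        (xs.foldl (fun acc v => if |v - x| < 20 then acc + 1 else acc) (0 : Int))
          = (pvCLT s (x + 20) : Int) - (pvCLE s (x - 20) : Int) := by
      intro x
      rw [PySem.List.foldl_ite_add_one (fun v => |v - x| < 20) xs 0]
      rw [← hperm.countP_eq]
      have := pv_count_split s x
      omega
    have hmain := pv_main s hs
      (fun x => xs.foldl (fun acc v => if |v - x| < 20 then acc + 1 else acc) (0 : Int))
      hcnt 0 0 0 (s.headD 0, 0) (by intro _; exact ⟨Nat.zero_le _, Nat.zero_le _⟩)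
    simp only [Nat.sub_zero, List.drop_zero] at hmain
    show (some (List.foldl (fun (b : Int × Int) x =>
        let count : Int := xs.foldl (fun acc v => if |v - x| < 20 then acc + 1 else acc) 0
        if count > b.2 then (x, count) else b) (s.headD 0, 0) s).1)
      = some ((List.foldl (fun (st : Nat × Nat × Int × Int) i =>
          let x := s.getD i 0
          let hi := pvAdvLt s (x + 20) st.2.1
          let lo := pvAdvLe s (x - 20) st.1
          let count : Int := (hi : Int) - (lo : Int)
          if count > st.2.2.2 then (lo, hi, x, count) else (lo, hi, st.2.2.1, st.2.2.2))
        (0, 0, s.headD 0, 0) (List.range s.length)).2.2.1)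
    rw [List.range_eq_range']
    exact congrArg (fun p : Int × Int => some p.1) hmain.symm
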